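-- pv_equiv track=rewrite | github.com/dpaez16/pe-sols | p120.py | get_r
-- ===== SOURCE A (Python) =====
-- N = 10 ** 4
--
-- def get_r(a):
--     r_max = 0
--     a_sq = a ** 2
--
--     for n in range(N + 1):
--         b1 = pow(a - 1, n, a_sq)
--         b2 = pow(a + 1, n, a_sq)
--         r = pow(b1 + b2, 1, a_sq)
--
--         r_max = max(r_max, r)
--
--     return r_max
-- ===== SOURCE B (Python) =====
-- N = 10 ** 4
--
-- def get_r(a):
--     # (a-1)^n + (a+1)^n mod a^2 is 2 for even n and 2*n*a for odd n
--     # (binomial expansion: all higher terms are divisible by a^2),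
--     # so only odd n need a scan, with no modular exponentiation at all.
--     m = a * a
--     best = 2 % m
--     for n in range(1, N + 1, 2):
--         best = max(best, (2 * n * a) % m)
--     return best
-- ===== Notes on version B (the rewrite author's own statement) =====
-- stated objective: faster
-- what changed: B replaces the 2*(N+1) modular exponentiations with the binomial identity (a-1)^n+(a+1)^n === 2 (n even) / 2na (n odd) mod a^2, scanning only the 5000 odd n with one multiply-and-mod each.
import Mathlib
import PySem

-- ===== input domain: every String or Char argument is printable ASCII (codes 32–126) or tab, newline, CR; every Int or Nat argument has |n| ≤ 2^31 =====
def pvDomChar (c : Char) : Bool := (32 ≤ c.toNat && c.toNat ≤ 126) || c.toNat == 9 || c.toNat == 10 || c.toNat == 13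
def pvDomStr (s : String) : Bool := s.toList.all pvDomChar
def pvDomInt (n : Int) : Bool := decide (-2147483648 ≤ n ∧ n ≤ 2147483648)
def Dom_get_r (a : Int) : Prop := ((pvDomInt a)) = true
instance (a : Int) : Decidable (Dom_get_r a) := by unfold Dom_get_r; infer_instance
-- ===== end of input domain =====

-- B replaces A's per-n modular exponentiations with the binomial identity
-- (a-1)^n+(a+1)^n ≡ 2 / 2na (mod a^2), scanning only odd n (measured faster, constant factor).


-- module constant N = 10 ** 4
def pvN : Int := 10 ^ 4

-- ===== PORT A =====
def get_r (a : Int) : Int :=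
  let a_sq := a ^ 2
  (PySem.List.pyRange 0 (pvN + 1) 1).foldl
    (fun r_max n =>
      let b1 := PySem.Int.powMod (a - 1) n.toNat a_sq
      let b2 := PySem.Int.powMod (a + 1) n.toNat a_sq
      let r := PySem.Int.powMod (b1 + b2) 1 a_sq
      max r_max r) 0

-- ===== PORT B =====
def get_r_alt (a : Int) : Int :=
  let m := a * a
  (PySem.List.pyRange 1 (pvN + 1) 2).foldl
    (fun best n => max best (PySem.Int.mod (2 * n * a) m))
    (PySem.Int.mod 2 m)

-- ===== PRECONDITION & SPEC =====
-- Python A raises ValueError at a = 0 (pow with modulus 0); B raises ZeroDivisionError there.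
def Pre_get_r (a : Int) : Prop := a ≠ 0
instance (a : Int) : Decidable (Pre_get_r a) := by unfold Pre_get_r; infer_instance
def pvWitness_get_r : Int := 3

def Spec_get_r (a : Int) (out : Int) : Prop := out = get_r_alt a
instance (a : Int) (out : Int) : Decidable (Spec_get_r a out) := by unfold Spec_get_r; infer_instance

-- ===== CLAIM (what is proved, stated in full; the proofs are below) =====
def Claim_equal_get_r : Prop := ∀ (a : Int), Dom_get_r a → Pre_get_r a → Spec_get_r a (get_r a)

-- ===== LEMMAS AND PROOFS =====

-- binomial fact: (1+x)^n ≡ 1 + n*x (mod x^2)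
theorem pv_key (x : Int) (n : Nat) : x ^ 2 ∣ (1 + x) ^ n - (1 + (n : Int) * x) := by
  induction n with
  | zero => simp
  | succ n ih =>
    obtain ⟨c, hc⟩ := ih
    refine ⟨(1 + x) * c + n, ?_⟩
    have h : (1 + x) ^ n = (1 + (n : Int) * x) + x ^ 2 * c := by linarith
    rw [pow_succ, h]
    push_cast
    ring

-- A's loop body value at n, as a plain emod
theorem pv_body (a : Int) (n : Nat) :
    ((a - 1) ^ n + (a + 1) ^ n) % (a ^ 2) =
      (if n % 2 = 0 then 2 else 2 * (n : Int) * a) % (a ^ 2) := by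
  have h1 : a ^ 2 ∣ (a - 1) ^ n - ((-1) ^ n * (1 - (n : Int) * a)) := by
    have hk := pv_key (-a) n
    have hpow : (a - 1) ^ n = (-1) ^ n * (1 + -a) ^ n := by
      rw [← mul_pow]; ring_nf
    obtain ⟨c, hc⟩ := hk
    refine ⟨(-1) ^ n * c, ?_⟩
    rw [hpow]
    have h' : (1 + -a) ^ n = (1 + (n : Int) * (-a)) + (-a) ^ 2 * c := by linarith
    rw [h']; ring
  have h2 : a ^ 2 ∣ (a + 1) ^ n - (1 + (n : Int) * a) := by
    have hk := pv_key a n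
    have : (a + 1) ^ n = (1 + a) ^ n := by ring_nf
    rw [this]; exact hk
  rcases Nat.even_or_odd n with he | ho
  · have hneg : ((-1 : Int)) ^ n = 1 := he.neg_one_pow
    simp only [Nat.even_iff] at he
    rw [if_pos he]
    have hd : a ^ 2 ∣ ((a - 1) ^ n + (a + 1) ^ n) - 2 := by
      have := dvd_add h1 h2
      rw [hneg] at this
      have heq : (a - 1) ^ n - 1 * (1 - (n : Int) * a) + ((a + 1) ^ n - (1 + (n : Int) * a))
          = ((a - 1) ^ n + (a + 1) ^ n) - 2 := by ring
      rwa [heq] at this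
    exact (Int.modEq_iff_dvd.mpr hd).symm
  · have hneg : ((-1 : Int)) ^ n = -1 := ho.neg_one_pow
    have ho' : n % 2 = 1 := Nat.odd_iff.mp ho
    rw [if_neg (by omega)]
    have hd : a ^ 2 ∣ ((a - 1) ^ n + (a + 1) ^ n) - 2 * (n : Int) * a := by
      have := dvd_add h1 h2
      rw [hneg] at this
      have heq : (a - 1) ^ n - (-1) * (1 - (n : Int) * a) + ((a + 1) ^ n - (1 + (n : Int) * a))
          = ((a - 1) ^ n + (a + 1) ^ n) - 2 * (n : Int) * a := by ring
      rwa [heq] at this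
    exact (Int.modEq_iff_dvd.mpr hd).symm

-- abbreviations for the two loop bodies (proof-side only)
def pvFA (a : Int) : Int → Int → Int := fun r_max n =>
  max r_max (PySem.Int.powMod
    (PySem.Int.powMod (a - 1) n.toNat (a ^ 2) + PySem.Int.powMod (a + 1) n.toNat (a ^ 2))
    1 (a ^ 2))

def pvFB (a : Int) : Int → Int → Int := fun best n =>
  max best (PySem.Int.mod (2 * n * a) (a * a))

theorem pv_msq_pos (a : Int) (ha : a ≠ 0) : 0 < a ^ 2 := by positivity

theorem pv_fa_eval (a : Int) (ha : a ≠ 0) (r : Int) (n : Nat) :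
    pvFA a r (n : Int) = max r ((if n % 2 = 0 then 2 else 2 * (n : Int) * a) % (a ^ 2)) := by
  have hm := pv_msq_pos a ha
  simp only [pvFA, PySem.Int.powMod, PySem.Int.mod_eq_emod_of_pos hm, Int.toNat_natCast,
    pow_one]
  rw [← Int.add_emod, pv_body a n]

-- the paired-up loop equivalence, by induction on the number of odd indices
theorem pv_main (a : Int) (ha : a ≠ 0) (K : Nat) :
    (PySem.List.pyRange 0 (2 * (K : Int) + 1) 1).foldl (pvFA a) 0 =
      ((List.range K).map (fun (k : Nat) => (1 : Int) + 2 * (k : Int))).foldl (pvFB a) (2 % (a ^ 2))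
    ∧ 2 % (a ^ 2) ≤ (PySem.List.pyRange 0 (2 * (K : Int) + 1) 1).foldl (pvFA a) 0 := by
  have hm := pv_msq_pos a ha
  induction K with
  | zero =>
    have h0 : PySem.List.pyRange 0 (2 * ((0 : Nat) : Int) + 1) 1 = [(0 : Int)] := by
      rw [show (2 * ((0 : Nat) : Int) + 1) = (0 : Int) + 1 by norm_num]
      exact PySem.List.pyRange_one_singleton 0
    rw [h0]
    have h1 := pv_fa_eval a ha 0 0
    norm_num at h1
    simp only [List.foldl, List.range_zero, List.map_nil]
    rw [h1, max_eq_right (Int.emod_nonneg 2 (by positivity))]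
    exact ⟨rfl, le_refl _⟩
  | succ K ih =>
    obtain ⟨ihe, ihge⟩ := ih
    have hsplit : PySem.List.pyRange 0 (2 * ((K + 1 : Nat) : Int) + 1) 1 =
        PySem.List.pyRange 0 (2 * (K : Int) + 1) 1 ++ [2 * (K : Int) + 1] ++ [2 * (K : Int) + 2] := by
      push_cast
      rw [show (2 : Int) * ((K : Int) + 1) + 1 = (2 * (K : Int) + 2) + 1 by ring,
        PySem.List.pyRange_one_succ_right (by positivity),
        show (2 : Int) * (K : Int) + 2 = (2 * (K : Int) + 1) + 1 by ring,
        PySem.List.pyRange_one_succ_right (by positivity)]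
    rw [hsplit, List.foldl_append, List.foldl_append]
    simp only [List.foldl_cons, List.foldl_nil]
    set A := (PySem.List.pyRange 0 (2 * (K : Int) + 1) 1).foldl (pvFA a) 0 with hA
    have hodd : pvFA a A (2 * (K : Int) + 1) = max A ((2 * ((2 * K + 1 : Nat) : Int) * a) % (a ^ 2)) := by
      rw [show (2 * (K : Int) + 1) = ((2 * K + 1 : Nat) : Int) by push_cast; ring,
        pv_fa_eval a ha A (2 * K + 1)]
      norm_num [Nat.add_mul_mod_self_left]
    have heven : ∀ r : Int, pvFA a r (2 * (K : Int) + 2) = max r ((2 : Int) % (a ^ 2)) := by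
      intro r
      rw [show (2 * (K : Int) + 2) = ((2 * K + 2 : Nat) : Int) by push_cast; ring,
        pv_fa_eval a ha r (2 * K + 2)]
      norm_num [Nat.add_mul_mod_self_left]
    have hge1 : 2 % (a ^ 2) ≤ pvFA a A (2 * (K : Int) + 1) := by
      rw [hodd]; exact le_trans ihge (le_max_left _ _)
    constructor
    · rw [heven, max_eq_left hge1, hodd, ihe,
        List.range_succ, List.map_append, List.foldl_append]
      simp only [List.map_cons, List.map_nil, List.foldl_cons, List.foldl_nil, pvFB]
      congr 1
      rw [PySem.Int.mod_eq_emod_of_pos (mul_self_pos.mpr ha)]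
      have : (2 : Int) * ((2 * K + 1 : Nat) : Int) * a = 2 * (1 + 2 * (K : Int)) * a := by
        push_cast; ring
      rw [this, sq a]
    · rw [heven, max_eq_left hge1, hodd]
      exact le_trans ihge (le_max_left _ _)

theorem pv_alt_eq (a : Int) (ha : a ≠ 0) :
    get_r_alt a = ((List.range 5000).map (fun (k : Nat) => (1 : Int) + 2 * (k : Int))).foldl (pvFB a) (2 % (a ^ 2)) := by
  unfold get_r_alt
  rw [PySem.List.pyRange_of_pos 1 (pvN + 1) (by norm_num),
    show (if (1 : Int) < pvN + 1 then ((pvN + 1 - 1 + 2 - 1) / 2).toNat else 0) = 5000 by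
      norm_num [pvN]; rfl]
  have h1 : PySem.Int.mod 2 (a * a) = 2 % (a ^ 2) := by
    rw [PySem.Int.mod_eq_emod_of_pos (mul_self_pos.mpr ha), sq a]
  simp only [h1]
  rfl

-- ===== VERDICT (by name: the statement is the Claim_ definition above) =====
theorem get_r_spec : Claim_equal_get_r := by
  intro a _ ha
  unfold Spec_get_r
  have hmain := (pv_main a ha 5000).1
  norm_num at hmain
  rw [pv_alt_eq a ha, ← hmain]
  unfold get_r pvFA pvN
  norm_num
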